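-- pv_equiv track=rewrite | github.com/xscchoux/Leetcode-Submissions | 1983-Widest Pair of Indices With Equal Range Sum.py | widestPairOfIndices
-- ===== SOURCE A (Python) =====
-- def widestPairOfIndices(nums1, nums2):
--     """
--     :type nums1: List[int]
--     :type nums2: List[int]
--     :rtype: int
--     """
--     prefixAll = [0]
--     for i in range(len(nums1)):
--         prefixAll.append(nums1[i] - nums2[i] + prefixAll[-1])
--
--     res = 0
--     hmap = dict()
--     for i in range(len(prefixAll)):
--         if prefixAll[i] not in hmap:
--             hmap[prefixAll[i]] = i
--         else:
--             res = max(res, i-hmap[prefixAll[i]])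
--
--     return res
-- ===== SOURCE B (Python) =====
-- def widestPairOfIndices(nums1, nums2):
--     n = len(nums1)
--     best = 0
--     for j in range(1, n + 1):
--         s = 0
--         for i in range(j - 1, -1, -1):
--             s += nums1[i] - nums2[i]
--             if s == 0:
--                 best = max(best, j - i)
--     return best
-- ===== Notes on version B (the rewrite author's own statement) =====
-- stated objective: alternative
-- what changed: Replaces A's prefix-sum array plus first-occurrence hash map with a direct quadratic scan: for every end index j it accumulates the difference sum backwards and records every zero-sum window, needing no prefix list and no dictionary.
import Mathlib
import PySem

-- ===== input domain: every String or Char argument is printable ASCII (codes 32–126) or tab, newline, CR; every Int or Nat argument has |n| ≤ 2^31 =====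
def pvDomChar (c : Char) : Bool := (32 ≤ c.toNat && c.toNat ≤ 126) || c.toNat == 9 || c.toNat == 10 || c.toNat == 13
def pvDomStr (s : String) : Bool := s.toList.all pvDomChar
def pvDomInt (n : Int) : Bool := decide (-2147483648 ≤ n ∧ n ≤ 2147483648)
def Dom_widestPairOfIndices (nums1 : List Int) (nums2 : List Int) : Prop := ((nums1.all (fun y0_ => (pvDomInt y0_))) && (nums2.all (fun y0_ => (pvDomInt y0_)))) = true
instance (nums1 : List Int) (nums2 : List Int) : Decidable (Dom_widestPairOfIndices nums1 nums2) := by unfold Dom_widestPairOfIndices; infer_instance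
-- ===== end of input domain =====

-- B replaces A's prefix-sum list + first-occurrence dict with a direct quadratic scan:
-- for each end index j it accumulates the difference sum backwards over all starts,
-- recording every zero-sum window (return value only; neither program mutates its arguments).

-- ===== PORT A =====
def widestPairOfIndices (nums1 : List Int) (nums2 : List Int) : Int :=
  -- prefixAll = [0]; for i in range(len(nums1)): prefixAll.append(nums1[i]-nums2[i]+prefixAll[-1])
  let prefixAll : List Int :=
    (PySem.List.pyRange 0 (nums1.length : Int) 1).foldl
      (fun acc i =>
        acc ++ [PySem.List.pyGetD nums1 i 0 - PySem.List.pyGetD nums2 i 0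
                  + PySem.List.pyGetD acc (-1) 0])
      [0]
  -- res = 0; hmap = {}; for i in range(len(prefixAll)): …
  let st : Int × PySem.Dict Int Int :=
    (PySem.List.pyRange 0 (prefixAll.length : Int) 1).foldl
      (fun (st : Int × PySem.Dict Int Int) i =>
        let p := PySem.List.pyGetD prefixAll i 0
        if st.2.contains p = false then (st.1, st.2.insert p i)
        else (max st.1 (i - st.2.getD p 0), st.2))
      (0, PySem.Dict.empty)
  st.1

-- ===== PORT B =====
def widestPairOfIndices_alt (nums1 : List Int) (nums2 : List Int) : Int :=
  -- n = len(nums1); best = 0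
  -- for j in range(1, n+1): s = 0; for i in range(j-1, -1, -1): s += nums1[i]-nums2[i]; if s == 0: best = max(best, j-i)
  let n : Int := nums1.length
  (PySem.List.pyRange 1 (n + 1) 1).foldl
    (fun best j =>
      ((PySem.List.pyRange (j - 1) (-1) (-1)).foldl
        (fun (st : Int × Int) i =>
          let s := st.1 + (PySem.List.pyGetD nums1 i 0 - PySem.List.pyGetD nums2 i 0)
          (s, if s == 0 then max st.2 (j - i) else st.2))
        (0, best)).2)
    0

-- ===== PRECONDITION & SPEC =====
-- A indexes nums2 at every index of nums1, so it raises IndexError when nums2 is shorter.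
def Pre_widestPairOfIndices (nums1 : List Int) (nums2 : List Int) : Prop :=
  nums1.length ≤ nums2.length
instance (nums1 : List Int) (nums2 : List Int) : Decidable (Pre_widestPairOfIndices nums1 nums2) := by unfold Pre_widestPairOfIndices; infer_instance
def pvWitness_widestPairOfIndices : List Int × List Int := ([1, 2, -1], [2, 1, 0])

def Spec_widestPairOfIndices (nums1 : List Int) (nums2 : List Int) (out : Int) : Prop := out = widestPairOfIndices_alt nums1 nums2
instance (nums1 : List Int) (nums2 : List Int) (out : Int) : Decidable (Spec_widestPairOfIndices nums1 nums2 out) := by unfold Spec_widestPairOfIndices; infer_instance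

-- ===== CLAIM (what is proved, stated in full; the proofs are below) =====
def Claim_equal_widestPairOfIndices : Prop := ∀ (nums1 : List Int) (nums2 : List Int), Dom_widestPairOfIndices nums1 nums2 → Pre_widestPairOfIndices nums1 nums2 → Spec_widestPairOfIndices nums1 nums2 (widestPairOfIndices nums1 nums2)

-- ===== LEMMAS AND PROOFS =====

-- A's prefixAll tail, computed structurally over the zipped pairs.
def buildPref (c : Int) : List (Int × Int) → List Int
  | [] => []
  | p :: t => (p.1 - p.2 + c) :: buildPref (p.1 - p.2 + c) t

-- A-side second-loop body, on (index, value) pairs.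
def stepA (st : Int × PySem.Dict Int Int) (pr : Int × Int) : Int × PySem.Dict Int Int :=
  if st.2.contains pr.2 = false then (st.1, st.2.insert pr.2 pr.1)
  else (max st.1 (pr.1 - st.2.getD pr.2 0), st.2)

-- B-side inner-loop body at outer index j.
def stepI (nums1 nums2 : List Int) (j : Int) (st : Int × Int) (i : Int) : Int × Int :=
  let s := st.1 + (PySem.List.pyGetD nums1 i 0 - PySem.List.pyGetD nums2 i 0)
  (s, if s == 0 then max st.2 (j - i) else st.2)

-- The common per-index step both programs compute: the widest window ending at j,
-- via the first occurrence of the prefix value p[j] among p[0..j-1].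
def wstep (p : List Int) (acc : Int) (j : Nat) : Int :=
  if p.getD j 0 ∈ p.take j then
    max acc ((j : Int) - (List.idxOf (p.getD j 0) (p.take j) : Int))
  else acc

lemma buildPref_length (c : Int) (l : List (Int × Int)) :
    (buildPref c l).length = l.length := by
  induction l generalizing c with
  | nil => rfl
  | cons p t ih => simp [buildPref, ih]

lemma pref_getD_succ (l : List (Int × Int)) :
    ∀ (c : Int) (i : Nat) (hi : i < l.length),
      (c :: buildPref c l).getD (i + 1) 0
        = (c :: buildPref c l).getD i 0 + ((l[i]'hi).1 - (l[i]'hi).2) := by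
  induction l with
  | nil => intro c i hi; simp at hi
  | cons a t ih =>
    intro c i hi
    cases i with
    | zero => simp [buildPref]; ring
    | succ k =>
      have hk : k < t.length := by simpa using hi
      have h := ih (a.1 - a.2 + c) k hk
      simpa [buildPref] using h

-- First loop: appending with prefixAll[-1] is buildPref, structurally.
lemma foldl_append_last (l : List (Int × Int)) :
    ∀ (acc0 : List Int) (c : Int),
      l.foldl (fun acc p => acc ++ [p.1 - p.2 + PySem.List.pyGetD acc (-1) 0]) (acc0 ++ [c])
        = acc0 ++ c :: buildPref c l := by
  induction l with
  | nil => intro acc0 c; simp [buildPref]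
  | cons p t ih =>
    intro acc0 c
    simp only [List.foldl_cons, PySem.List.pyGetD_neg_one_append_singleton, buildPref]
    rw [ih (acc0 ++ [c]) (p.1 - p.2 + c)]
    simp

-- A's dict scan computes the wstep fold: the dict is the first-occurrence index map.
lemma A_inv (p : List Int) (q : List Int) :
    ∀ (m : Nat) (D : PySem.Dict Int Int) (res : Int),
      p.drop m = q →
      (∀ v, D.contains v = decide (v ∈ p.take m)) →
      (∀ v, v ∈ p.take m → D.getD v 0 = (List.idxOf v (p.take m) : Int)) →
      ((PySem.List.enumerate q (m : Int)).foldl stepA (res, D)).1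
        = (List.range' m (p.length - m)).foldl (wstep p) res := by
  induction q with
  | nil =>
    intro m D res hq _ _
    have hlen : p.length ≤ m := List.drop_eq_nil_iff.mp hq
    simp [PySem.List.enumerate_nil, Nat.sub_eq_zero_of_le hlen]
  | cons v q' ih =>
    intro m D res hq hc hg
    have hm : m < p.length := by
      by_contra h
      rw [List.drop_eq_nil_iff.mpr (by omega)] at hq
      exact List.cons_ne_nil _ _ hq.symm
    have hdrop := List.drop_eq_getElem_cons hm
    rw [hq] at hdrop
    obtain ⟨hv, hq'⟩ := List.cons_eq_cons.mp hdrop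
    have ht : p.take (m + 1) = p.take m ++ [v] := by
      rw [List.take_add_one, List.getElem?_eq_getElem hm, ← hv]; rfl
    have hlt : (p.take m).length = m := by rw [List.length_take]; omega
    rw [PySem.List.enumerate_cons, List.foldl_cons]
    rw [show p.length - m = (p.length - (m + 1)) + 1 by omega, List.range'_succ, List.foldl_cons]
    have hcast : (m : Int) + 1 = ((m + 1 : Nat) : Int) := by push_cast; ring
    by_cases hvm : v ∈ p.take m
    · have hws : wstep p res m = max res ((m : Int) - (List.idxOf v (p.take m) : Int)) := by
        unfold wstep
        rw [List.getD_eq_getElem p 0 hm, ← hv, if_pos hvm]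
      have hcv : D.contains v = true := by rw [hc]; exact decide_eq_true hvm
      have hstep : stepA (res, D) ((m : Int), v) = (max res ((m : Int) - D.getD v 0), D) := by
        simp [stepA, hcv]
      rw [hstep, hg v hvm, hws, hcast]
      apply ih
      · exact hq'.symm
      · intro v'
        rw [hc]
        simp only [decide_eq_decide]
        rw [ht, List.mem_append, List.mem_singleton]
        constructor
        · exact Or.inl
        · rintro (h | rfl)
          · exact h
          · exact hvm
      · intro v' hv'
        have hv'm : v' ∈ p.take m := by
          rw [ht, List.mem_append, List.mem_singleton] at hv'
          rcases hv' with h | rfl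
          · exact h
          · exact hvm
        rw [ht, List.idxOf_append, if_pos hv'm]
        exact hg v' hv'm
    · have hws : wstep p res m = res := by
        unfold wstep
        rw [List.getD_eq_getElem p 0 hm, ← hv, if_neg hvm]
      have hcv : D.contains v = false := by rw [hc]; exact decide_eq_false hvm
      have hstep : stepA (res, D) ((m : Int), v) = (res, D.insert v (m : Int)) := by
        simp [stepA, hcv]
      rw [hstep, hws, hcast]
      apply ih
      · exact hq'.symm
      · intro v'
        rw [PySem.Dict.contains_insert, hc, ht]
        by_cases hvv : v' = v
        · subst hvv; simp
        · simp [hvv, List.mem_append]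
      · intro v' hv'
        by_cases hvv : v' = v
        · subst hvv
          rw [PySem.Dict.getD_insert_self]
          rw [ht, List.idxOf_append, if_neg hvm, List.idxOf_cons_self, hlt]
          simp
        · rw [PySem.Dict.getD_insert_of_ne _ _ _ hvv]
          have hv'm : v' ∈ p.take m := by
            rw [ht, List.mem_append, List.mem_singleton] at hv'
            tauto
          rw [ht, List.idxOf_append, if_pos hv'm]
          exact hg v' hv'm

-- B's backward inner scan at end index j computes the same step: the running sum hits 0
-- exactly at the starts with equal prefix value, and the smallest start wins the max.
lemma B_inner (nums1 nums2 : List Int) (hpre : nums1.length ≤ nums2.length) (j : Nat)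
    (_hj : j < (0 :: buildPref 0 (nums1.zip nums2)).length) :
    ∀ (m : Nat) (best : Int), m < (0 :: buildPref 0 (nums1.zip nums2)).length →
      ((PySem.List.pyRange ((m : Int) - 1) (-1) (-1)).foldl (stepI nums1 nums2 (j : Int))
          ((0 :: buildPref 0 (nums1.zip nums2)).getD j 0
             - (0 :: buildPref 0 (nums1.zip nums2)).getD m 0, best)).2
        = if (0 :: buildPref 0 (nums1.zip nums2)).getD j 0
              ∈ (0 :: buildPref 0 (nums1.zip nums2)).take m then
            max best ((j : Int)
              - (List.idxOf ((0 :: buildPref 0 (nums1.zip nums2)).getD j 0)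
                  ((0 :: buildPref 0 (nums1.zip nums2)).take m) : Int))
          else best := by
  set p := 0 :: buildPref 0 (nums1.zip nums2) with hp
  intro m
  induction m with
  | zero =>
    intro best _
    rw [show ((0 : Nat) : Int) - 1 = -1 by norm_num,
      PySem.List.pyRange_neg_one_eq_nil (by norm_num)]
    simp
  | succ m ih =>
    intro best hm1
    have hm : m < p.length := by omega
    have hd : m < (nums1.zip nums2).length := by
      have : p.length = (nums1.zip nums2).length + 1 := by simp [hp, buildPref_length]
      omega
    have hn1 : m < nums1.length := by
      have := List.length_zip (l₁ := nums1) (l₂ := nums2); omega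
    have hn2 : m < nums2.length := by
      have := List.length_zip (l₁ := nums1) (l₂ := nums2); omega
    have hlt : (p.take m).length = m := by rw [List.length_take]; omega
    have hpm : p.getD m 0 = p[m]'hm := List.getD_eq_getElem p 0 hm
    have ht : p.take (m + 1) = p.take m ++ [p[m]'hm] := by
      rw [List.take_add_one, List.getElem?_eq_getElem hm]; rfl
    rw [show ((m + 1 : Nat) : Int) - 1 = (m : Int) by push_cast; ring]
    rw [PySem.List.pyRange_neg_one_cons (by omega), List.foldl_cons]
    have hs : p.getD j 0 - p.getD (m + 1) 0
        + (nums1.getD m 0 - nums2.getD m 0) = p.getD j 0 - p.getD m 0 := by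
      have e3 := pref_getD_succ (nums1.zip nums2) 0 m hd
      rw [← hp] at e3
      rw [e3, List.getElem_zip, List.getD_eq_getElem nums1 0 hn1,
        List.getD_eq_getElem nums2 0 hn2]
      ring
    have hstep : stepI nums1 nums2 (j : Int) (p.getD j 0 - p.getD (m + 1) 0, best) ((m : Int))
        = (p.getD j 0 - p.getD m 0,
           if p.getD m 0 = p.getD j 0 then max best ((j : Int) - (m : Int)) else best) := by
      unfold stepI
      rw [PySem.List.pyGetD_natCast, PySem.List.pyGetD_natCast]
      simp only [hs, beq_iff_eq, sub_eq_zero]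
      by_cases h : p.getD j 0 = p.getD m 0
      · rw [if_pos h, if_pos h.symm]
      · rw [if_neg h, if_neg (fun hh => h hh.symm)]
    rw [hstep]
    by_cases hmem : p.getD j 0 ∈ p.take m
    · have hvmem1 : p.getD j 0 ∈ p.take (m + 1) := by
        rw [ht]; exact List.mem_append_left _ hmem
      have hfm : List.idxOf (p.getD j 0) (p.take (m + 1))
          = List.idxOf (p.getD j 0) (p.take m) := by
        rw [ht, List.idxOf_append, if_pos hmem]
      rw [if_pos hvmem1, hfm]
      have hidx : List.idxOf (p.getD j 0) (p.take m) < m := by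
        have := List.idxOf_lt_length_of_mem hmem
        omega
      by_cases heq : p.getD m 0 = p.getD j 0
      · rw [if_pos heq, ih (max best ((j : Int) - (m : Int))) hm, if_pos hmem]
        rw [max_assoc]
        congr 1
        apply max_eq_right
        have : ((List.idxOf (p.getD j 0) (p.take m) : Nat) : Int) < (m : Int) := by
          exact_mod_cast hidx
        omega
      · rw [if_neg heq, ih best hm, if_pos hmem]
    · by_cases heq : p.getD m 0 = p.getD j 0
      · have hvmem1 : p.getD j 0 ∈ p.take (m + 1) := by
          rw [ht]
          refine List.mem_append_right _ ?_
          rw [← hpm, heq]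
          exact List.mem_singleton_self _
        rw [if_pos hvmem1]
        have hfm : List.idxOf (p.getD j 0) (p.take (m + 1)) = m := by
          rw [ht, List.idxOf_append, if_neg hmem, ← hpm, heq, List.idxOf_cons_self, hlt]
          omega
        rw [hfm, if_pos heq, ih (max best ((j : Int) - (m : Int))) hm, if_neg hmem]
      · have hvmem1 : p.getD j 0 ∉ p.take (m + 1) := by
          rw [ht, List.mem_append, List.mem_singleton, ← hpm]
          rintro (h | h)
          · exact hmem h
          · exact heq h.symm
        rw [if_neg hvmem1, if_neg heq, ih best hm, if_neg hmem]

-- ===== VERDICT (by name: the statement is the Claim_ definition above) =====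
theorem widestPairOfIndices_spec : Claim_equal_widestPairOfIndices := by
  intro nums1 nums2 _ hpre
  unfold Spec_widestPairOfIndices widestPairOfIndices widestPairOfIndices_alt
  unfold Pre_widestPairOfIndices at hpre
  have hzlen : (nums1.zip nums2).length = nums1.length := by
    simp [List.length_zip]; omega
  -- Loop 1 of A: rewrite the indexed fold as a fold over the zipped list.
  have h1 :
      (PySem.List.pyRange 0 (nums1.length : Int) 1).foldl
        (fun acc i =>
          acc ++ [PySem.List.pyGetD nums1 i 0 - PySem.List.pyGetD nums2 i 0
                    + PySem.List.pyGetD acc (-1) 0]) [0]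
        = (nums1.zip nums2).foldl
            (fun acc p => acc ++ [p.1 - p.2 + PySem.List.pyGetD acc (-1) 0]) [0] := by
    rw [PySem.List.foldl_congr_mem
        (g := fun acc i =>
          acc ++ [(PySem.List.pyGetD (nums1.zip nums2) i (0, 0)).1
                    - (PySem.List.pyGetD (nums1.zip nums2) i (0, 0)).2
                    + PySem.List.pyGetD acc (-1) 0])]
    · rw [← hzlen]
      exact PySem.List.foldl_pyRange_zero_pyGetD (nums1.zip nums2) (0, 0)
        (fun acc p => acc ++ [p.1 - p.2 + PySem.List.pyGetD acc (-1) 0]) [0]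
    · intro acc i hi
      rw [PySem.List.mem_pyRange_one] at hi
      rw [PySem.List.pyGetD_eq_getElem _ (0, 0) hi.1 (by rw [hzlen]; omega),
        PySem.List.pyGetD_eq_getElem _ 0 hi.1 (by omega),
        PySem.List.pyGetD_eq_getElem _ 0 hi.1 (by omega)]
      simp [List.getElem_zip]
  rw [h1]
  rw [show ([0] : List Int) = [] ++ [0] from rfl, foldl_append_last]
  simp only [List.nil_append]
  -- Loop 2 of A: rewrite the indexed fold as a fold over enumerate.
  have h2 : ∀ (xs : List Int),
      (PySem.List.pyRange 0 (xs.length : Int) 1).foldl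
        (fun (st : Int × PySem.Dict Int Int) i =>
          let p := PySem.List.pyGetD xs i 0
          if st.2.contains p = false then (st.1, st.2.insert p i)
          else (max st.1 (i - st.2.getD p 0), st.2))
        (0, PySem.Dict.empty)
        = (PySem.List.enumerate xs).foldl stepA (0, PySem.Dict.empty) := by
    intro xs
    rw [PySem.List.enumerate_eq_map_pyRange (d := 0), List.foldl_map]
    rfl
  rw [h2]
  -- A's result is the wstep fold over all prefix indices.
  have hA := A_inv (0 :: buildPref 0 (nums1.zip nums2)) (0 :: buildPref 0 (nums1.zip nums2))
    0 PySem.Dict.empty 0 (by simp)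
    (fun v => by simp [PySem.Dict.contains_empty])
    (fun v hv => by simp at hv)
  simp only [Nat.cast_zero, Nat.sub_zero] at hA
  rw [hA]
  -- B's side: turn the outer pyRange into List.range and compare pointwise.
  have hplen : (0 :: buildPref 0 (nums1.zip nums2)).length = nums1.length + 1 := by
    simp [buildPref_length, hzlen]
  rw [PySem.List.pyRange_one 1 ((nums1.length : Int) + 1)]
  rw [show ((nums1.length : Int) + 1 - 1).toNat = nums1.length by omega]
  rw [List.foldl_map]
  rw [hplen, List.range'_succ, List.foldl_cons]
  rw [show wstep (0 :: buildPref 0 (nums1.zip nums2)) 0 0 = 0 by simp [wstep]]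
  rw [List.range'_eq_map_range, List.foldl_map]
  apply PySem.List.foldl_congr_mem
  intro acc k hk
  have hk' : k < nums1.length := List.mem_range.mp hk
  have hj : k + 1 < (0 :: buildPref 0 (nums1.zip nums2)).length := by rw [hplen]; omega
  have hBk := B_inner nums1 nums2 hpre (k + 1) hj (k + 1) acc hj
  rw [sub_self] at hBk
  rw [show (1 : Int) + (k : Int) = ((k + 1 : Nat) : Int) by push_cast; ring]
  rw [Nat.add_comm 1 k]
  unfold stepI at hBk
  rw [hBk]
  rfl
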